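-- pv_equiv track=rewrite | github.com/rayz1065/competitive-programming | cpc-meetups/week-1/digits-sum/main.py | solve
-- ===== SOURCE A (Python) =====
-- def sum_digits(n):
--     return sum(int(x) for x in str(n))
--
-- def solve(a, b):
--     frequency = 0
--     res = 0
--
--     while a % 10 != 0 and a <= b:
--         res += sum_digits(a)
--         frequency += 1
--         a += 1
--
--     while b % 10 != 9 and a <= b:
--         res += sum_digits(b)
--         frequency += 1
--         b -= 1
--
--     if a > b:
--         return frequency, res
--
--     a //= 10
--     b //= 10
--     other_frequency, other_res = solve(a, b)
--
--     res += other_res * 10 + (b - a + 1) * 45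
--     frequency += other_frequency * 10
--
--     return frequency, res
-- ===== SOURCE B (Python) =====
-- def sum_digits(n):
--     return sum(int(x) for x in str(n))
--
-- def prefix_digit_sum(n):
--     # sum of sum_digits(i) for 0 <= i < n, via one divide-by-10 recursion
--     if n <= 0:
--         return 0
--     q, r = divmod(n, 10)
--     return 10 * prefix_digit_sum(q) + 45 * q + r * sum_digits(q) + r * (r - 1) // 2
--
-- def solve(a, b):
--     if a > b:
--         return 0, 0
--     return b - a + 1, prefix_digit_sum(b + 1) - prefix_digit_sum(a)
-- ===== Notes on version B (the rewrite author's own statement) =====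
-- stated objective: alternative
-- what changed: Replaces A's two boundary-trimming while loops plus recursion on the interval pair with a closed-form count and a difference of prefix digit-sums computed by a single divide-by-10 recursion.
import Mathlib
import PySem

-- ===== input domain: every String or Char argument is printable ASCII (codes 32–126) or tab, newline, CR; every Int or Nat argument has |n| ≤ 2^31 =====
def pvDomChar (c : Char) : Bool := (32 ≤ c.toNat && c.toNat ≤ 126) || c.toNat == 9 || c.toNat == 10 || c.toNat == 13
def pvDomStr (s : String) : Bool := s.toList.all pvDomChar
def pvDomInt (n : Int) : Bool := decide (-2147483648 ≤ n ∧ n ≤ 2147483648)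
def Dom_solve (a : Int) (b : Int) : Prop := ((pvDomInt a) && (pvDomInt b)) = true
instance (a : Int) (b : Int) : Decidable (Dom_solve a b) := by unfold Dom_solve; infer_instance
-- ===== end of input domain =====

-- B replaces A's two boundary-trimming while loops + recursion on the interval pair by a
-- closed-form count and a difference of prefix digit-sums (objective: alternative, not faster).

-- ===== PORT A =====

-- int(x) for a one-character string x; exact on digit characters (the only calls inside Pre_;
-- Python raises ValueError on '-', where ofChars? is none and we take 0).
def charInt (c : Char) : Int := (PySem.Int.ofChars? [c]).getD 0

-- sum_digits(n) = sum(int(x) for x in str(n)); exact for n ≥ 0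
def sumDigits (n : Int) : Int := ((PySem.Int.toChars n).map charInt).sum

-- measure lemmas for the ports' termination (cited by name in decreasing_by)
theorem decLoop1 (a b : Int) (h : PySem.Int.mod a 10 ≠ 0 ∧ a ≤ b) :
    (b + 1 - (a + 1)).toNat < (b + 1 - a).toNat := by omega
theorem decLoop2 (a b : Int) (h : PySem.Int.mod b 10 ≠ 9 ∧ a ≤ b) :
    (b - 1 + 1 - a).toNat < (b + 1 - a).toNat := by omega
theorem decHalf (n : Int) (h : ¬ n ≤ 0) : (PySem.Int.floordiv n 10).toNat < n.toNat := by
  rw [PySem.Int.floordiv_eq_ediv_of_pos (by omega : (0:Int) < 10)]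
  omega

-- first while loop: while a % 10 != 0 and a <= b: res += sum_digits(a); frequency += 1; a += 1
def solveLoop1 (b a freq res : Int) : Int × Int × Int :=
  if PySem.Int.mod a 10 ≠ 0 ∧ a ≤ b then
    solveLoop1 b (a + 1) (freq + 1) (res + sumDigits a)
  else (a, freq, res)
termination_by (b + 1 - a).toNat
decreasing_by exact decLoop1 a b (by assumption)

-- second while loop: while b % 10 != 9 and a <= b: res += sum_digits(b); frequency += 1; b -= 1
def solveLoop2 (a b freq res : Int) : Int × Int × Int :=
  if PySem.Int.mod b 10 ≠ 9 ∧ a ≤ b then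
    solveLoop2 a (b - 1) (freq + 1) (res + sumDigits b)
  else (b, freq, res)
termination_by (b + 1 - a).toNat
decreasing_by exact decLoop2 a b (by assumption)

-- the body of Python's solve; the Nat argument is pure fuel (one unit per recursive call, so
-- (b - a).toNat + 1 always suffices, as solveGo_eq below proves) — a totality guard, not the algorithm
def solveGo : Nat → Int → Int → Int × Int
  | 0, _, _ => (0, 0)
  | fuel + 1, a, b =>
    let t1 := solveLoop1 b a 0 0
    let t2 := solveLoop2 t1.1 b t1.2.1 t1.2.2
    if t1.1 > t2.1 then (t2.2.1, t2.2.2)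
    else
      let o := solveGo fuel (PySem.Int.floordiv t1.1 10) (PySem.Int.floordiv t2.1 10)
      (t2.2.1 + o.1 * 10,
       t2.2.2 + o.2 * 10 + (PySem.Int.floordiv t2.1 10 - PySem.Int.floordiv t1.1 10 + 1) * 45)

def solve (a : Int) (b : Int) : Int × Int := solveGo ((b - a).toNat + 1) a b

-- ===== PORT B =====

-- prefix_digit_sum(n) = sum of sum_digits(i) for 0 <= i < n, one divide-by-10 recursion
def prefixDigitSum (n : Int) : Int :=
  if n ≤ 0 then 0
  else
    10 * prefixDigitSum (PySem.Int.floordiv n 10) + 45 * PySem.Int.floordiv n 10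
      + PySem.Int.mod n 10 * sumDigits (PySem.Int.floordiv n 10)
      + PySem.Int.floordiv (PySem.Int.mod n 10 * (PySem.Int.mod n 10 - 1)) 2
termination_by n.toNat
decreasing_by exact decHalf n (by assumption)

def solve_alt (a : Int) (b : Int) : Int × Int :=
  if a > b then (0, 0)
  else (b - a + 1, prefixDigitSum (b + 1) - prefixDigitSum a)

-- ===== PRECONDITION & SPEC =====
-- Pre_ excludes exactly the inputs a < 0 ≤ b - a … i.e. a < 0 with a ≤ b, on which the Python A
-- raises ValueError (sum_digits hits the '-' sign of a negative number).
def Pre_solve (a : Int) (b : Int) : Prop := 0 ≤ a ∨ b < a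
instance (a : Int) (b : Int) : Decidable (Pre_solve a b) := by unfold Pre_solve; infer_instance
def pvWitness_solve : Int × Int := (7, 123)

def Spec_solve (a : Int) (b : Int) (out : Int × Int) : Prop := out = solve_alt a b
instance (a : Int) (b : Int) (out : Int × Int) : Decidable (Spec_solve a b out) := by unfold Spec_solve; infer_instance

-- ===== CLAIM (what is proved, stated in full; the proofs are below) =====
def Claim_equal_solve : Prop := ∀ (a : Int) (b : Int), Dom_solve a b → Pre_solve a b → Spec_solve a b (solve a b)

-- ===== LEMMAS AND PROOFS =====

theorem decStep (a b : Int) (h : a < b) : (b - (a + 1)).toNat < (b - a).toNat := by omega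

-- digit sums summed over the half-open integer interval [a, b)
def dsumH (a b : Int) : Int :=
  if a < b then sumDigits a + dsumH (a + 1) b else 0
termination_by (b - a).toNat
decreasing_by exact decStep a b (by assumption)

theorem dsumH_nil {a b : Int} (h : b ≤ a) : dsumH a b = 0 := by
  rw [dsumH, if_neg (by omega)]

theorem dsumH_cons {a b : Int} (h : a < b) : dsumH a b = sumDigits a + dsumH (a + 1) b := by
  rw [dsumH, if_pos h]

theorem dsumH_split {a b : Int} (m : Int) (h1 : a ≤ m) (h2 : m ≤ b) :
    dsumH a b = dsumH a m + dsumH m b := by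
  have key : ∀ (n : Nat) (a : Int), (m - a).toNat = n → a ≤ m → dsumH a b = dsumH a m + dsumH m b := by
    intro n
    induction n with
    | zero =>
      intro a hn ha
      have hm : a = m := by omega
      rw [hm, dsumH_nil (le_refl m)]
      ring
    | succ k ih =>
      intro a hn ha
      have ham : a < m := by omega
      rw [dsumH_cons (by omega : a < b), dsumH_cons ham, ih (a + 1) (by omega) (by omega)]
      ring
  exact key (m - a).toNat a rfl h1

theorem dsumH_snoc {a b : Int} (h : a < b) : dsumH a b = dsumH a (b - 1) + sumDigits (b - 1) := by
  rw [dsumH_split (b - 1) (by omega) (by omega), dsumH_cons (by omega : b - 1 < b),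
    dsumH_nil (by omega : b ≤ b - 1 + 1)]
  ring

-- ---- digit characterisation of sumDigits ----

theorem toDigitsCore_acc : ∀ (n f g : Nat) (acc : List Char), n < f → n < g →
    Nat.toDigitsCore 10 f n acc = Nat.toDigitsCore 10 g n [] ++ acc := by
  intro n
  induction n using Nat.strong_induction_on with
  | _ n IH =>
    intro f g acc hf hg
    match f, g with
    | f + 1, g + 1 =>
      simp only [Nat.toDigitsCore]
      by_cases h0 : n / 10 = 0
      · simp [h0]
      · simp only [h0, if_false]
        have hlt : n / 10 < n := Nat.div_lt_self (by omega) (by omega)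
        rw [IH (n / 10) hlt f (n / 10 + 1) _ (by omega) (by omega),
          IH (n / 10) hlt g (n / 10 + 1) _ (by omega) (by omega)]
        simp

theorem toDigits_tail (m k : Nat) (hm : 0 < m) (hk : k < 10) :
    Nat.toDigits 10 (10 * m + k) = Nat.toDigits 10 m ++ [Nat.digitChar k] := by
  have hmod : (10 * m + k) % 10 = k := by omega
  have hdiv : (10 * m + k) / 10 = m := by omega
  show Nat.toDigitsCore 10 (10 * m + k + 1) (10 * m + k) [] = _
  simp only [Nat.toDigitsCore, hmod, hdiv]
  rw [if_neg (by omega)]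
  rw [toDigitsCore_acc m (10 * m + k) (m + 1) [Nat.digitChar k] (by omega) (by omega)]
  rfl

theorem toDigits_single (k : Nat) (hk : k < 10) : Nat.toDigits 10 k = [Nat.digitChar k] := by
  have hmod : k % 10 = k := by omega
  have hdiv : k / 10 = 0 := by omega
  show Nat.toDigitsCore 10 (k + 1) k [] = _
  simp [Nat.toDigitsCore, hmod, hdiv]

theorem charInt_digitChar : ∀ k : Nat, k < 10 → charInt (Nat.digitChar k) = (k : Int) := by decide

theorem sumDigits_nat (m : Nat) : sumDigits (m : Int) = ((Nat.toDigits 10 m).map charInt).sum := by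
  unfold sumDigits PySem.Int.toChars
  rw [if_neg (by omega : ¬ ((m : Int) < 0))]
  simp

theorem sumDigits_step (q r : Int) (hq : 0 ≤ q) (hr0 : 0 ≤ r) (hr : r < 10) :
    sumDigits (10 * q + r) = sumDigits q + r := by
  obtain ⟨m, rfl⟩ : ∃ m : Nat, q = (m : Int) := ⟨q.toNat, by omega⟩
  obtain ⟨k, rfl⟩ : ∃ k : Nat, r = (k : Int) := ⟨r.toNat, by omega⟩
  have hk : k < 10 := by omega
  have h1 : sumDigits ((k : Nat) : Int) = (k : Int) := by
    rw [sumDigits_nat, toDigits_single k hk]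
    simp [charInt_digitChar k hk]
  by_cases hm : m = 0
  · subst hm
    have h0 : sumDigits ((0 : Nat) : Int) = 0 := by
      rw [sumDigits_nat, toDigits_single 0 (by omega)]
      simp [charInt_digitChar 0 (by omega)]
    have e : (10 : Int) * ((0 : Nat) : Int) + (k : Int) = ((k : Nat) : Int) := by push_cast; ring
    rw [e, h1, h0]
    ring
  · have hcast : (10 * (m : Int) + (k : Int)) = ((10 * m + k : Nat) : Int) := by push_cast; ring
    rw [hcast, sumDigits_nat, sumDigits_nat, toDigits_tail m k (by omega) hk]
    simp [charInt_digitChar k hk]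

-- ---- row and decade sums ----

theorem dsumH_row (q : Int) (hq : 0 ≤ q) (r : Int) (hr0 : 0 ≤ r) (hr : r ≤ 10) :
    2 * dsumH (10 * q) (10 * q + r) = 2 * (r * sumDigits q) + r * (r - 1) := by
  have key : ∀ (n : Nat), (n : Int) ≤ 10 →
      2 * dsumH (10 * q) (10 * q + (n : Int)) = 2 * ((n : Int) * sumDigits q) + (n : Int) * ((n : Int) - 1) := by
    intro n
    induction n with
    | zero =>
      intro _
      rw [show 10 * q + ((0 : Nat) : Int) = 10 * q by simp, dsumH_nil (le_refl _)]
      push_cast; ring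
    | succ k ih =>
      intro hn
      have hkn : (k : Int) < 10 := by push_cast at hn; omega
      have hca : ((k + 1 : Nat) : Int) = (k : Int) + 1 := by push_cast; ring
      rw [hca]
      have hsn : dsumH (10 * q) (10 * q + ((k : Int) + 1))
          = dsumH (10 * q) (10 * q + (k : Int)) + sumDigits (10 * q + (k : Int)) := by
        have h := dsumH_snoc (a := 10 * q) (b := 10 * q + ((k : Int) + 1)) (by omega)
        rw [show 10 * q + ((k : Int) + 1) - 1 = 10 * q + (k : Int) by ring] at h
        exact h
      have hsd := sumDigits_step q (k : Int) hq (by omega) hkn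
      have ihh := ih (by omega)
      rw [hsn, hsd]
      linear_combination ihh
  obtain ⟨n, rfl⟩ : ∃ n : Nat, r = (n : Int) := ⟨r.toNat, by omega⟩
  exact key n hr

theorem dsumH_decade (q : Int) (hq : 0 ≤ q) : dsumH 0 (10 * q) = 10 * dsumH 0 q + 45 * q := by
  have key : ∀ (n : Nat), dsumH 0 (10 * (n : Int)) = 10 * dsumH 0 (n : Int) + 45 * (n : Int) := by
    intro n
    induction n with
    | zero =>
      have e : (10 : Int) * ((0 : Nat) : Int) = 0 := by simp
      rw [e, dsumH_nil (le_refl (0 : Int))]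
      push_cast
      rw [dsumH_nil (le_refl (0 : Int))]
      ring
    | succ k ih =>
      have hcast : (10 : Int) * ((k + 1 : Nat) : Int) = 10 * (k : Int) + 10 := by push_cast; ring
      rw [hcast, dsumH_split (10 * (k : Int)) (by positivity) (by omega)]
      have hrow := dsumH_row (k : Int) (by positivity) 10 (by omega) (le_refl _)
      have hsn : dsumH 0 ((k : Int) + 1) = dsumH 0 (k : Int) + sumDigits (k : Int) := by
        rw [dsumH_snoc (by positivity : (0 : Int) < (k : Int) + 1)]
        simp
      push_cast
      rw [hsn] at *
      omega
  obtain ⟨n, rfl⟩ : ∃ n : Nat, q = (n : Int) := ⟨q.toNat, by omega⟩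
  exact key n

-- ---- B's prefix sum computes dsumH 0 n ----

theorem prefix_eq (n : Int) (hn : 0 ≤ n) : prefixDigitSum n = dsumH 0 n := by
  have key : ∀ (k : Nat) (n : Int), n.toNat = k → 0 ≤ n → prefixDigitSum n = dsumH 0 n := by
    intro k
    induction k using Nat.strong_induction_on with
    | _ k IH =>
      intro n hk hn
      by_cases h0 : n ≤ 0
      · rw [prefixDigitSum, if_pos h0, dsumH_nil (by omega)]
      · rw [prefixDigitSum, if_neg h0]
        have h10 : (0:Int) < 10 := by omega
        have hq := PySem.Int.floordiv_mul_add_mod n 10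
        have hm0 := PySem.Int.mod_nonneg n h10
        have hml := PySem.Int.mod_lt n h10
        set q := PySem.Int.floordiv n 10 with hqdef
        set r := PySem.Int.mod n 10 with hrdef
        have hqn : 0 ≤ q := by omega
        have hql : q < n := by omega
        have hIH : prefixDigitSum q = dsumH 0 q := IH q.toNat (by omega) q (by omega) hqn
        have hsplit : dsumH 0 n = dsumH 0 (10 * q) + dsumH (10 * q) (10 * q + r) := by
          rw [show (10 : Int) * q + r = n by omega]
          exact dsumH_split (10 * q) (by omega) (by omega)
        have hdec := dsumH_decade q hqn
        have hrow := dsumH_row q hqn r (by omega) (by omega)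
        have hfd : PySem.Int.floordiv (r * (r - 1)) 2 = (r * (r - 1)) / 2 :=
          PySem.Int.floordiv_eq_ediv_of_pos (by omega)
        rw [hIH, hfd, hsplit, hdec]
        omega
  exact key n.toNat n rfl hn

-- ---- full characterisation of A's loops ----

theorem solveLoop1_spec (b : Int) : ∀ a f r, ∃ a1, solveLoop1 b a f r = (a1, f + (a1 - a), r + dsumH a a1)
    ∧ a ≤ a1 ∧ a1 ≤ max a (b + 1) ∧ (PySem.Int.mod a1 10 = 0 ∨ b < a1) := by
  intro a f r
  fun_induction solveLoop1 b a f r with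
  | case1 a f r h ih =>
    obtain ⟨a1, e, h1, h2, h3⟩ := ih
    refine ⟨a1, ?_, by omega, by omega, h3⟩
    rw [e, dsumH_cons (by omega : a < a1)]
    refine congrArg₂ _ rfl (congrArg₂ _ (by ring) (by ring))
  | case2 a f r h =>
    refine ⟨a, ?_, le_refl a, by omega, ?_⟩
    · rw [dsumH_nil (le_refl a)]; refine congrArg₂ _ rfl (congrArg₂ _ (by ring) (by ring))
    · by_cases h0 : PySem.Int.mod a 10 = 0
      · exact Or.inl h0
      · exact Or.inr (by omega)

theorem solveLoop2_spec (a : Int) : ∀ b f r, ∃ b2, solveLoop2 a b f r = (b2, f + (b - b2), r + dsumH (b2 + 1) (b + 1))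
    ∧ b2 ≤ b ∧ min (a - 1) b ≤ b2 ∧ (PySem.Int.mod b2 10 = 9 ∨ b2 < a) := by
  intro b f r
  fun_induction solveLoop2 a b f r with
  | case1 b f r h ih =>
    obtain ⟨b2, e, h1, h2, h3⟩ := ih
    refine ⟨b2, ?_, by omega, by omega, h3⟩
    rw [e, dsumH_snoc (by omega : b2 + 1 < b + 1), show b + 1 - 1 = b by ring,
      show b - 1 + 1 = b by ring]
    refine congrArg₂ _ rfl (congrArg₂ _ (by omega) (by ring))
  | case2 b f r h =>
    refine ⟨b, ?_, le_refl b, by omega, ?_⟩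
    · rw [dsumH_nil (by omega : b + 1 ≤ b + 1)]; refine congrArg₂ _ rfl (congrArg₂ _ (by ring) (by ring))
    · by_cases h9 : PySem.Int.mod b 10 = 9
      · exact Or.inl h9
      · exact Or.inr (by omega)

-- ---- A computes the count and the interval digit sum ----

theorem solveGo_eq : ∀ (fuel : Nat) (a b : Int), (b - a).toNat < fuel → 0 ≤ a →
    solveGo fuel a b = (max (b + 1 - a) 0, dsumH a (b + 1)) := by
  intro fuel
  induction fuel with
  | zero => intro a b hn ha; omega
  | succ fuel IH =>
    intro a b hn ha
    obtain ⟨a1, e1, ha1, hub1, hex1⟩ := solveLoop1_spec b a 0 0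
    obtain ⟨b2, e2, hb2, hlb2, hex2⟩ := solveLoop2_spec a1 b (0 + (a1 - a)) (0 + dsumH a a1)
    rw [solveGo]
    simp only [e1]
    simp only [e2]
    split_ifs with h
    · -- a1 > b2 : loops consumed everything
      by_cases hab : a ≤ b
      · -- then b2 = a1 - 1 and [a,a1) ∪ [a1,b+1) = [a,b+1)
        have hub1' : a1 ≤ b + 1 := by omega
        have hb2' : b2 = a1 - 1 := by omega
        have hsp := @dsumH_split a (b + 1) a1 (by omega) (by omega)
        have hrw : dsumH (b2 + 1) (b + 1) = dsumH a1 (b + 1) := by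
          rw [show b2 + 1 = a1 by omega]
        refine congrArg₂ _ (by omega) (by omega)
      · -- empty range: a1 = a, b2 = b
        have hA : a1 = a := by omega
        have hB : b2 = b := by omega
        have h0 : dsumH a a1 = 0 := by rw [hA]; exact dsumH_nil (le_refl a)
        have h1 : dsumH (b2 + 1) (b + 1) = 0 := by rw [hB]; exact dsumH_nil (le_refl (b + 1))
        have h2 : dsumH a (b + 1) = 0 := dsumH_nil (by omega)
        refine congrArg₂ _ (by omega) (by omega)
    · -- a1 ≤ b2 : recurse on the inner full decades
      have hab : a1 ≤ b2 := by omega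
      have m1 : PySem.Int.mod a1 10 = 0 := by rcases hex1 with h' | h' <;> omega
      have m2 : PySem.Int.mod b2 10 = 9 := by rcases hex2 with h' | h' <;> omega
      have e1' := PySem.Int.floordiv_mul_add_mod a1 10
      have e2' := PySem.Int.floordiv_mul_add_mod b2 10
      set q1 := PySem.Int.floordiv a1 10 with hq1
      set q2 := PySem.Int.floordiv b2 10 with hq2
      have hq1n : 0 ≤ q1 := by omega
      have hq12 : q1 ≤ q2 := by omega
      have hmeas : (q2 - q1).toNat < fuel := by omega
      have hIH := IH q1 q2 hmeas hq1n
      simp only [hIH]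
      have hmax : max (q2 + 1 - q1) 0 = q2 + 1 - q1 := by omega
      -- digit sum over the full decades [a1, b2+1) = [10*q1, 10*(q2+1))
      have hdec1 := dsumH_decade q1 hq1n
      have hdec2 := dsumH_decade (q2 + 1) (by omega)
      have hs1 : dsumH 0 (10 * (q2 + 1)) = dsumH 0 (10 * q1) + dsumH (10 * q1) (10 * (q2 + 1)) :=
        dsumH_split (10 * q1) (by omega) (by omega)
      have hs2 : dsumH 0 (q2 + 1) = dsumH 0 q1 + dsumH q1 (q2 + 1) :=
        dsumH_split q1 (by omega) (by omega)
      have hmid : dsumH a1 (b2 + 1) = 10 * dsumH q1 (q2 + 1) + 45 * (q2 + 1 - q1) := by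
        rw [show a1 = 10 * q1 by omega, show b2 + 1 = 10 * (q2 + 1) by omega]
        omega
      have hall : dsumH a (b + 1) = dsumH a a1 + dsumH a1 (b2 + 1) + dsumH (b2 + 1) (b + 1) := by
        rw [@dsumH_split a (b + 1) a1 (by omega) (by omega),
          @dsumH_split a1 (b + 1) (b2 + 1) (by omega) (by omega)]
        ring
      refine congrArg₂ _ (by omega) (by omega)

theorem solve_empty (a b : Int) (h : b < a) : solve a b = (0, 0) := by
  obtain ⟨a1, e1, ha1, hub1, _⟩ := solveLoop1_spec b a 0 0
  have hA : a1 = a := by omega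
  obtain ⟨b2, e2, hb2, hlb2, _⟩ := solveLoop2_spec a1 b (0 + (a1 - a)) (0 + dsumH a a1)
  have hB : b2 = b := by omega
  have hf : (b - a).toNat + 1 = 0 + 1 := by omega
  rw [solve, hf, solveGo]
  simp only [e1]
  simp only [e2]
  rw [if_pos (by omega : a1 > b2), hA, hB, dsumH_nil (le_refl a), dsumH_nil (le_refl (b + 1))]
  norm_num

-- ===== VERDICT (by name: the statement is the Claim_ definition above) =====
theorem solve_spec : Claim_equal_solve := by
  intro a b _ hpre
  show solve a b = solve_alt a b
  by_cases ha : 0 ≤ a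
  · rw [solve, solveGo_eq ((b - a).toNat + 1) a b (by omega) ha]
    unfold solve_alt
    split_ifs with h
    · rw [dsumH_nil (by omega : b + 1 ≤ a)]
      refine congrArg₂ _ (by omega) rfl
    · rw [prefix_eq (b + 1) (by omega), prefix_eq a ha,
        @dsumH_split 0 (b + 1) a ha (by omega)]
      refine congrArg₂ _ (by omega) (by ring)
  · have hba : b < a := hpre.resolve_left ha
    rw [solve_empty a b hba]
    unfold solve_alt
    rw [if_pos hba]
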